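-- pv_equiv track=rewrite | github.com/wulanmantiri/smart-traffic-api | containers/detect_vehicles/app/labels.py | count_vehicle_labels
-- ===== SOURCE A (Python) =====
-- def count_vehicle_labels(labels):
--     res = {
--         'car': 0,
--         'truck': 0,
--         'motorbike': 0,
--         'bus': 0,
--     }
--     for name in labels:
--         try:
--             res[name] += 1
--         except KeyError:
--             pass
--     res['total'] = sum(res.values())
--     return res
-- ===== SOURCE B (Python) =====
-- def count_vehicle_labels(labels):
--     res = {k: labels.count(k) for k in ('car', 'truck', 'motorbike', 'bus')}
--     res['total'] = sum(res.values())
--     return res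
-- ===== Notes on version B (the rewrite author's own statement) =====
-- stated objective: idiomatic
-- what changed: Replaces the guarded try/except running-count loop with a tally-then-select shape: a dict comprehension that counts each of the four fixed keys directly via list.count, then adds the total.
import Mathlib
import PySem

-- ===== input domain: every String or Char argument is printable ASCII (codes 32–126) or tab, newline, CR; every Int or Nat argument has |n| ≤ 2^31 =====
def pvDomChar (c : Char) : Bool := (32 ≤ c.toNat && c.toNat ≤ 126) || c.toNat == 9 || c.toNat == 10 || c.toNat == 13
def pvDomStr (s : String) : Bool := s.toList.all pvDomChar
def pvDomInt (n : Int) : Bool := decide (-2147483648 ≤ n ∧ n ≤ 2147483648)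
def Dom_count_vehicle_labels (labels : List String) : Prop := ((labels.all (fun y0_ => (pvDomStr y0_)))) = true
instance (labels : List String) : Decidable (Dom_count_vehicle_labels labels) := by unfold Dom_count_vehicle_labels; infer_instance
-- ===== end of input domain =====

-- B replaces A's guarded try/except running-count loop with a direct per-key tally (list.count) plus a total; idiomatic, same cost.

-- ===== PORT A =====
-- 'res[name] += 1' inside try/except KeyError: pass  ==  increment only if the key is present
def count_vehicle_labels (labels : List String) : List (String × Int) :=
  let res0 : PySem.Dict String Int :=
    PySem.Dict.mk [("car", 0), ("truck", 0), ("motorbike", 0), ("bus", 0)]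
  let res := labels.foldl
    (fun d name => if d.contains name then d.modify name 0 (· + 1) else d) res0
  (res.insert "total" (res.values.foldl (· + ·) 0)).items

-- ===== PORT B =====
def count_vehicle_labels_alt (labels : List String) : List (String × Int) :=
  let res : List (String × Int) :=
    ["car", "truck", "motorbike", "bus"].map (fun k => (k, (labels.count k : Int)))
  res ++ [("total", (res.map (·.2)).foldl (· + ·) 0)]

-- ===== PRECONDITION & SPEC =====
def Spec_count_vehicle_labels (labels : List String) (out : List (String × Int)) : Prop := out = count_vehicle_labels_alt labels
instance (labels : List String) (out : List (String × Int)) : Decidable (Spec_count_vehicle_labels labels out) := by unfold Spec_count_vehicle_labels; infer_instance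

-- ===== CLAIM (what is proved, stated in full; the proofs are below) =====
def Claim_equal_count_vehicle_labels : Prop := ∀ (labels : List String), Dom_count_vehicle_labels labels → Spec_count_vehicle_labels labels (count_vehicle_labels labels)

-- ===== LEMMAS AND PROOFS =====

-- A's loop over a dict holding exactly the four fixed keys adds each label's count to its key.
theorem loopA (labels : List String) : ∀ (a b c d : Int),
    labels.foldl (fun d name => if d.contains name then d.modify name 0 (· + 1) else d)
      (PySem.Dict.mk [("car", a), ("truck", b), ("motorbike", c), ("bus", d)])
    = PySem.Dict.mk [("car", a + labels.count "car"), ("truck", b + labels.count "truck"),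
        ("motorbike", c + labels.count "motorbike"), ("bus", d + labels.count "bus")] := by
  induction labels with
  | nil => intro a b c d; simp
  | cons x xs ih =>
    intro a b c d
    simp only [List.foldl_cons]
    by_cases h1 : x = "car"
    · subst h1
      rw [show (if (PySem.Dict.mk [("car", a), ("truck", b), ("motorbike", c), ("bus", d)]).contains "car"
            then (PySem.Dict.mk [("car", a), ("truck", b), ("motorbike", c), ("bus", d)]).modify "car" 0 (· + 1)
            else PySem.Dict.mk [("car", a), ("truck", b), ("motorbike", c), ("bus", d)])
          = PySem.Dict.mk [("car", a + 1), ("truck", b), ("motorbike", c), ("bus", d)]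
        from by simp [PySem.Dict.modify, PySem.Dict.insert, PySem.Dict.getD, PySem.Dict.get?], ih]
      simp
      omega
    by_cases h2 : x = "truck"
    · subst h2
      rw [show (if (PySem.Dict.mk [("car", a), ("truck", b), ("motorbike", c), ("bus", d)]).contains "truck"
            then (PySem.Dict.mk [("car", a), ("truck", b), ("motorbike", c), ("bus", d)]).modify "truck" 0 (· + 1)
            else PySem.Dict.mk [("car", a), ("truck", b), ("motorbike", c), ("bus", d)])
          = PySem.Dict.mk [("car", a), ("truck", b + 1), ("motorbike", c), ("bus", d)]
        from by simp [PySem.Dict.modify, PySem.Dict.insert, PySem.Dict.getD, PySem.Dict.get?], ih]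
      simp
      omega
    by_cases h3 : x = "motorbike"
    · subst h3
      rw [show (if (PySem.Dict.mk [("car", a), ("truck", b), ("motorbike", c), ("bus", d)]).contains "motorbike"
            then (PySem.Dict.mk [("car", a), ("truck", b), ("motorbike", c), ("bus", d)]).modify "motorbike" 0 (· + 1)
            else PySem.Dict.mk [("car", a), ("truck", b), ("motorbike", c), ("bus", d)])
          = PySem.Dict.mk [("car", a), ("truck", b), ("motorbike", c + 1), ("bus", d)]
        from by simp [PySem.Dict.modify, PySem.Dict.insert, PySem.Dict.getD, PySem.Dict.get?], ih]
      simp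
      omega
    by_cases h4 : x = "bus"
    · subst h4
      rw [show (if (PySem.Dict.mk [("car", a), ("truck", b), ("motorbike", c), ("bus", d)]).contains "bus"
            then (PySem.Dict.mk [("car", a), ("truck", b), ("motorbike", c), ("bus", d)]).modify "bus" 0 (· + 1)
            else PySem.Dict.mk [("car", a), ("truck", b), ("motorbike", c), ("bus", d)])
          = PySem.Dict.mk [("car", a), ("truck", b), ("motorbike", c), ("bus", d + 1)]
        from by simp [PySem.Dict.modify, PySem.Dict.insert, PySem.Dict.getD, PySem.Dict.get?], ih]
      simp
      omega
    · rw [show (if (PySem.Dict.mk [("car", a), ("truck", b), ("motorbike", c), ("bus", d)]).contains x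
            then (PySem.Dict.mk [("car", a), ("truck", b), ("motorbike", c), ("bus", d)]).modify x 0 (· + 1)
            else PySem.Dict.mk [("car", a), ("truck", b), ("motorbike", c), ("bus", d)])
          = PySem.Dict.mk [("car", a), ("truck", b), ("motorbike", c), ("bus", d)]
        from by simp [Ne.symm h1, Ne.symm h2, Ne.symm h3, Ne.symm h4], ih]
      simp [h1, h2, h3, h4]

-- ===== VERDICT (by name: the statement is the Claim_ definition above) =====
theorem count_vehicle_labels_spec : Claim_equal_count_vehicle_labels := by
  intro labels _
  unfold Spec_count_vehicle_labels count_vehicle_labels count_vehicle_labels_alt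
  dsimp only
  rw [loopA]
  simp [PySem.Dict.insert, PySem.Dict.values]
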